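-- pv_equiv track=rewrite | github.com/Arsen1302/Code-copy-detector | TestData/solutions/problem_1482_2.py | solution_1482_2
-- ===== SOURCE A (Python) =====
-- def solution_1482_2(s: str, power: int, modulo: int, k: int, hashValue: int) -> str:
--
-- 	sc=0
-- 	i=len(s)-1
-- 	a=0
-- 	m = (power**k)%modulo
--
-- 	while i>-1:
--
-- 		sc=(sc*power + ord(s[i])-97+1)%modulo
--
-- 		if i+k<len(s):
-- 			sc=(sc-((ord(s[i+k])-97+1)*m))%modulo
--
-- 		if sc==hashValue:
-- 			a=i
-- 		i=i-1
--
-- 	return s[a:a+k]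
-- ===== SOURCE B (Python) =====
-- def solution_1482_2(s: str, power: int, modulo: int, k: int, hashValue: int) -> str:
--     # Naive per-window recomputation: first index (left to right) whose
--     # polynomial hash matches; default to the leading window.
--     for i in range(len(s)):
--         val = 0
--         for ch in reversed(s[i:i + k]):
--             val = (val * power + ord(ch) - 96) % modulo
--         if val == hashValue:
--             return s[i:i + k]
--     return s[:k]
-- ===== Notes on version B (the rewrite author's own statement) =====
-- stated objective: simpler
-- what changed: Replaced A's right-to-left incremental rolling hash (add leading char, subtract trailing char times power^k, remember the last matching index) by a plain left-to-right scan that recomputes each window's polynomial hash from scratch by Horner over the reversed slice and returns at the first match, defaulting to s[:k].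
-- outside the precondition, e.g. on solution_1482_2('zzcb', 1, 5, -2, 4): A returns 'zz', B returns 'zc'; on solution_1482_2('ab', 2, 0, 1, 3): A raises ZeroDivisionError, B raises ZeroDivisionError
import Mathlib
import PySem

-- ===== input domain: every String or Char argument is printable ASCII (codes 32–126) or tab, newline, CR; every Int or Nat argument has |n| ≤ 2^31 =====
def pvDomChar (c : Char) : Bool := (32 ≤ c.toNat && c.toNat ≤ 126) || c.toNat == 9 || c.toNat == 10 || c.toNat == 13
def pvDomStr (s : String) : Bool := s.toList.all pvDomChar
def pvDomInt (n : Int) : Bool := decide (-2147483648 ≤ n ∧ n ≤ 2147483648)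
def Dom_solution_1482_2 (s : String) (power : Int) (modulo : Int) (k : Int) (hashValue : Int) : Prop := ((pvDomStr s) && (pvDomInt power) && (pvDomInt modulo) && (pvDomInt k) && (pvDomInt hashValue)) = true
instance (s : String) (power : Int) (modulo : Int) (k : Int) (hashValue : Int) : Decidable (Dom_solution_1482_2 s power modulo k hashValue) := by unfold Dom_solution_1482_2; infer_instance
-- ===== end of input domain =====

-- B replaces A's right-to-left incremental rolling hash by a simpler left-to-right
-- scan that recomputes each window's hash from scratch and returns the first match.

-- ===== PORT A =====
-- while-loop of A: fuel = i+1 (i runs len-1 … 0); state (sc, a).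
-- s[i] and s[i+k] are always in range here (0 ≤ i < len, and i+k < len is the
-- guard), so List.getD is exact for Python's s[...].
def pvALoop (cs : List Char) (power modulo m hashValue k : Int) :
    Nat → Int → Nat → Nat
  | 0, _sc, a => a
  | i + 1, sc, a =>
    let sc1 := PySem.Int.mod (sc * power + ((cs.getD i ' ').toNat : Int) - 97 + 1) modulo
    let sc2 := if (i : Int) + k < (cs.length : Int) then
        PySem.Int.mod (sc1 - (((cs.getD (i + k.toNat) ' ').toNat : Int) - 97 + 1) * m) modulo
      else sc1
    let a' := if sc2 = hashValue then i else a
    pvALoop cs power modulo m hashValue k i sc2 a'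

-- power**k is an integer power since Pre_ requires 0 ≤ k (k.toNat is exact there)
def solution_1482_2 (s : String) (power : Int) (modulo : Int) (k : Int) (hashValue : Int) : String :=
  let cs := s.toList
  let m := PySem.Int.mod (power ^ k.toNat) modulo
  let a := pvALoop cs power modulo m hashValue k cs.length 0 0
  PySem.Str.slice s (some (a : Int)) (some ((a : Int) + k))

-- ===== PORT B =====
-- hash of one window, Horner over the reversed slice (val*power + ord(ch)-96) % modulo
def pvBHash (power modulo : Int) (w : List Char) : Int :=
  w.reverse.foldl (fun v c => PySem.Int.mod (v * power + ((c.toNat : Int) - 96)) modulo) 0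

-- for i in range(len(s)): return first matching window, else s[:k]
def solution_1482_2_alt (s : String) (power : Int) (modulo : Int) (k : Int) (hashValue : Int) : String :=
  let cs := s.toList
  match (List.range cs.length).find?
      (fun (i : Nat) => pvBHash power modulo (PySem.List.slice cs (some (i : Int)) (some ((i : Int) + k))) == hashValue) with
  | some i => PySem.Str.slice s (some (i : Int)) (some ((i : Int) + k))
  | none => PySem.Str.slice s none (some k)

-- ===== PRECONDITION & SPEC =====
-- Pre_ excludes modulo = 0, on which A raises ZeroDivisionError, and k < 0, on
-- which A's power**k is a Python float so the whole hash computation runs in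
-- unportable float arithmetic (and B's s[i:i+k] means a different window anyway).
def Pre_solution_1482_2 (s : String) (power : Int) (modulo : Int) (k : Int) (hashValue : Int) : Prop :=
  modulo ≠ 0 ∧ 0 ≤ k
instance (s : String) (power : Int) (modulo : Int) (k : Int) (hashValue : Int) : Decidable (Pre_solution_1482_2 s power modulo k hashValue) := by unfold Pre_solution_1482_2; infer_instance

def pvWitness_solution_1482_2 : String × Int × Int × Int × Int := ("leetcode", 7, 20, 2, 0)

def Spec_solution_1482_2 (s : String) (power : Int) (modulo : Int) (k : Int) (hashValue : Int) (out : String) : Prop := out = solution_1482_2_alt s power modulo k hashValue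
instance (s : String) (power : Int) (modulo : Int) (k : Int) (hashValue : Int) (out : String) : Decidable (Spec_solution_1482_2 s power modulo k hashValue out) := by unfold Spec_solution_1482_2; infer_instance

-- ===== CLAIM (what is proved, stated in full; the proofs are below) =====
def Claim_equal_solution_1482_2 : Prop := ∀ (s : String) (power : Int) (modulo : Int) (k : Int) (hashValue : Int), Dom_solution_1482_2 s power modulo k hashValue → Pre_solution_1482_2 s power modulo k hashValue → Spec_solution_1482_2 s power modulo k hashValue (solution_1482_2 s power modulo k hashValue)

-- ===== LEMMAS AND PROOFS =====

-- the character value ord(ch) - 96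
def pvVal (c : Char) : Int := (c.toNat : Int) - 96

-- raw (un-reduced) polynomial hash of a window: Σ val w[j] * power^j
def pvP (power : Int) (w : List Char) : Int :=
  w.reverse.foldl (fun v c => v * power + pvVal c) 0

theorem pvmod_sub_dvd (b a : Int) : b ∣ a - PySem.Int.mod a b := by
  refine ⟨PySem.Int.floordiv a b, ?_⟩
  have h := PySem.Int.floordiv_mul_add_mod a b
  linarith [h]

theorem pvmod_modEq (b a : Int) : Int.ModEq b a (PySem.Int.mod a b) :=
  (Int.modEq_iff_dvd.mpr (by simpa using pvmod_sub_dvd b a)).symm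

theorem pvmod_congr {b x y : Int} (hb : b ≠ 0) (h : Int.ModEq b x y) :
    PySem.Int.mod x b = PySem.Int.mod y b := by
  have hd : b ∣ PySem.Int.mod x b - PySem.Int.mod y b := by
    have h1 := pvmod_sub_dvd b x
    have h2 := pvmod_sub_dvd b y
    have h3 : b ∣ y - x := Int.ModEq.dvd h
    have h3' : b ∣ x - y := by
      have := Int.ModEq.dvd h.symm
      simpa using this
    have : PySem.Int.mod x b - PySem.Int.mod y b
        = (x - y) - (x - PySem.Int.mod x b) + (y - PySem.Int.mod y b) := by ring
    rw [this]
    exact dvd_add (dvd_sub h3' h1) h2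
  rcases lt_or_gt_of_ne hb with hneg | hpos
  · have b1 := PySem.Int.mod_neg_bounds (a := x) hneg
    have b2 := PySem.Int.mod_neg_bounds (a := y) hneg
    have hd' : -b ∣ PySem.Int.mod x b - PySem.Int.mod y b := (neg_dvd).mpr hd
    have := Int.eq_zero_of_abs_lt_dvd hd' (by rw [abs_lt]; omega)
    omega
  · have b1l := PySem.Int.mod_nonneg (a := x) hpos
    have b1u := PySem.Int.mod_lt (a := x) hpos
    have b2l := PySem.Int.mod_nonneg (a := y) hpos
    have b2u := PySem.Int.mod_lt (a := y) hpos
    have := Int.eq_zero_of_abs_lt_dvd hd (by rw [abs_lt]; omega)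
    omega

theorem pvmod_zero (b : Int) : PySem.Int.mod 0 b = 0 :=
  (PySem.Int.mod_eq_zero_iff_dvd 0 b).mpr (dvd_zero b)

-- Horner fold, shifted start
theorem pvFold_shift (power : Int) (l : List Char) :
    ∀ v : Int, l.foldl (fun v c => v * power + pvVal c) v
      = v * power ^ l.length + l.foldl (fun v c => v * power + pvVal c) 0 := by
  induction l with
  | nil => intro v; simp
  | cons c l ih =>
    intro v
    simp only [List.foldl_cons, List.length_cons]
    rw [ih (v * power + pvVal c), ih (0 * power + pvVal c)]
    ring

theorem pvP_cons (power : Int) (c : Char) (w : List Char) :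
    pvP power (c :: w) = pvP power w * power + pvVal c := by
  simp [pvP, List.foldl_append]

theorem pvP_append_singleton (power : Int) (w : List Char) (d : Char) :
    pvP power (w ++ [d]) = pvVal d * power ^ w.length + pvP power w := by
  simp only [pvP, List.reverse_append, List.reverse_cons, List.reverse_nil,
    List.nil_append, List.singleton_append, List.foldl_cons]
  rw [pvFold_shift]
  rw [List.length_reverse]
  ring

-- B's per-window hash is the reduced raw hash
theorem pvBfold (power modulo : Int) (hm : modulo ≠ 0) (l : List Char) :
    ∀ x : Int, l.foldl (fun v c => PySem.Int.mod (v * power + ((c.toNat : Int) - 96)) modulo)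
        (PySem.Int.mod x modulo)
      = PySem.Int.mod (l.foldl (fun v c => v * power + pvVal c) x) modulo := by
  induction l with
  | nil => intro x; rfl
  | cons c l ih =>
    intro x
    simp only [List.foldl_cons]
    have : PySem.Int.mod (PySem.Int.mod x modulo * power + ((c.toNat : Int) - 96)) modulo
        = PySem.Int.mod (x * power + pvVal c) modulo := by
      refine pvmod_congr hm ?_
      have := (pvmod_modEq modulo x).symm
      exact (this.mul_right power).add_right _
    rw [this, ← ih (x * power + pvVal c)]

theorem pvBHash_eq (power modulo : Int) (hm : modulo ≠ 0) (w : List Char) :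
    pvBHash power modulo w = PySem.Int.mod (pvP power w) modulo := by
  unfold pvBHash pvP
  cases hrev : w.reverse with
  | nil => simp [pvmod_zero]
  | cons c l =>
    simp only [List.foldl_cons]
    have h0 : PySem.Int.mod (0 * power + ((c.toNat : Int) - 96)) modulo
        = PySem.Int.mod (0 * power + pvVal c) modulo := rfl
    calc l.foldl (fun v c => PySem.Int.mod (v * power + ((c.toNat : Int) - 96)) modulo)
            (PySem.Int.mod (0 * power + ((c.toNat : Int) - 96)) modulo)
        = PySem.Int.mod (l.foldl (fun v c => v * power + pvVal c) (0 * power + pvVal c)) modulo := by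
          rw [h0, pvBfold power modulo hm l]
      _ = _ := by simp

-- the window starting at j, as drop/take
def pvW (cs : List Char) (t j : Nat) : List Char := (cs.drop j).take t

-- reduced hash of the window at j
def pvH (cs : List Char) (power modulo : Int) (t j : Nat) : Int :=
  PySem.Int.mod (pvP power (pvW cs t j)) modulo

-- the rolling step: from the reduced hash at i+1 to the reduced hash at i
theorem pvRoll (cs : List Char) (power modulo : Int) (hm : modulo ≠ 0) (t i : Nat)
    (hi : i < cs.length) :
    (if (i : Int) + (t : Int) < (cs.length : Int) then
        PySem.Int.mod
          (PySem.Int.mod (pvH cs power modulo t (i + 1) * power + ((cs.getD i ' ').toNat : Int) - 97 + 1) modulo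
            - (((cs.getD (i + t) ' ').toNat : Int) - 97 + 1) * PySem.Int.mod (power ^ t) modulo) modulo
      else
        PySem.Int.mod (pvH cs power modulo t (i + 1) * power + ((cs.getD i ' ').toNat : Int) - 97 + 1) modulo)
      = pvH cs power modulo t i := by
  have hdrop : cs.drop i = cs[i] :: cs.drop (i + 1) := List.drop_eq_getElem_cons hi
  have hgi : cs.getD i ' ' = cs[i] := List.getD_eq_getElem cs ' ' hi
  have hsc : Int.ModEq modulo (pvH cs power modulo t (i + 1)) (pvP power (pvW cs t (i + 1))) :=
    (pvmod_modEq modulo _).symm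
  have h1 : Int.ModEq modulo
      (pvH cs power modulo t (i + 1) * power + ((cs.getD i ' ').toNat : Int) - 97 + 1)
      (pvP power (pvW cs t (i + 1)) * power + ((cs.getD i ' ').toNat : Int) - 97 + 1) :=
    (((hsc.mul_right power).add_right (((cs.getD i ' ').toNat : Int))).sub_right 97).add_right 1
  by_cases hin : (i : Int) + (t : Int) < (cs.length : Int)
  · -- full window: subtract the outgoing character
    have hit : i + t < cs.length := by exact_mod_cast (by omega : ((i + t : Nat) : Int) < (cs.length : Int))
    have hgd : cs.getD (i + t) ' ' = cs[i + t] := List.getD_eq_getElem cs ' ' hit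
    rw [if_pos hin]
    have hmE : Int.ModEq modulo (PySem.Int.mod (power ^ t) modulo) (power ^ t) :=
      (pvmod_modEq modulo _).symm
    have h2 : Int.ModEq modulo
        (PySem.Int.mod (pvH cs power modulo t (i + 1) * power + ((cs.getD i ' ').toNat : Int) - 97 + 1) modulo
          - (((cs.getD (i + t) ' ').toNat : Int) - 97 + 1) * PySem.Int.mod (power ^ t) modulo)
        (pvP power (pvW cs t (i + 1)) * power + ((cs.getD i ' ').toNat : Int) - 97 + 1
          - (((cs.getD (i + t) ' ').toNat : Int) - 97 + 1) * power ^ t) :=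
      ((pvmod_modEq modulo _).symm.trans h1).sub
        ((Int.ModEq.refl (((cs.getD (i + t) ' ').toNat : Int) - 97 + 1)).mul hmE)
    rcases Nat.eq_zero_or_pos t with ht0 | htpos
    · -- t = 0 : both windows empty, everything cancels mod modulo
      subst ht0
      have hw1 : pvW cs 0 (i + 1) = [] := by simp [pvW]
      have hw0 : pvW cs 0 i = [] := by simp [pvW]
      have hRHS : pvH cs power modulo 0 i = PySem.Int.mod (0 : Int) modulo := by
        simp [pvH, hw0, pvP]
      rw [hRHS]
      refine pvmod_congr hm (h2.trans ?_)
      have : pvP power (pvW cs 0 (i + 1)) * power + ((cs.getD i ' ').toNat : Int) - 97 + 1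
          - (((cs.getD (i + 0) ' ').toNat : Int) - 97 + 1) * power ^ 0 = 0 := by
        rw [hw1]; show (0 : Int) * power + _ - 97 + 1 - _ = 0
        simp
      rw [this]
    · -- t ≥ 1
      have hget : (cs.drop (i + 1))[t - 1]'(by rw [List.length_drop]; omega) = cs[i + t] := by
        rw [List.getElem_drop]; congr 1; omega
      have hsplit : pvW cs t (i + 1) = pvW cs (t - 1) (i + 1) ++ [cs[i + t]] := by
        rw [pvW, pvW, ← hget]
        have ht' : t = (t - 1) + 1 := by omega
        conv_lhs => rw [ht', List.take_succ]
        have hsome : (cs.drop (i + 1))[t - 1]? = some ((cs.drop (i + 1))[t - 1]'(by rw [List.length_drop]; omega)) :=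
          List.getElem?_eq_getElem (by rw [List.length_drop]; omega)
        rw [hsome]
        rfl
      have hlenW : (pvW cs (t - 1) (i + 1)).length = t - 1 := by
        simp [pvW, List.length_take, List.length_drop]; omega
      have hw0 : pvW cs t i = cs[i] :: pvW cs (t - 1) (i + 1) := by
        have hstep : pvW cs t i = List.take ((t - 1) + 1) (cs[i] :: List.drop (i + 1) cs) := by
          rw [pvW, hdrop]
          congr 1
          omega
        rw [hstep, List.take_succ_cons]
        rfl
      refine pvmod_congr hm (h2.trans ?_)
      have hEq : pvP power (pvW cs t (i + 1)) * power + ((cs.getD i ' ').toNat : Int) - 97 + 1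
            - (((cs.getD (i + t) ' ').toNat : Int) - 97 + 1) * power ^ t
          = pvP power (pvW cs t i) := by
        rw [hsplit, pvP_append_singleton, hw0, pvP_cons, hlenW, hgi, hgd]
        have hp : power ^ t = power ^ (t - 1) * power := by
          conv_lhs => rw [show t = (t - 1) + 1 by omega]
          rw [pow_succ]
        rw [hp]
        simp only [pvVal]
        ring
      rw [hEq]
  · -- truncated window: window i = cs[i] :: window (i+1)
    have hnn : (cs.length : Int) ≤ (i : Int) + (t : Int) := by omega
    have hit : cs.length ≤ i + t := by exact_mod_cast hnn
    have htpos : 1 ≤ t := by omega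
    have hw1 : pvW cs t (i + 1) = cs.drop (i + 1) := by
      rw [pvW, List.take_of_length_le]; rw [List.length_drop]; omega
    have hw0 : pvW cs t i = cs[i] :: pvW cs t (i + 1) := by
      rw [pvW, hdrop, hw1]
      cases t with
      | zero => omega
      | succ t' =>
        simp only [List.take_succ_cons]
        rw [List.take_of_length_le]
        rw [List.length_drop]; omega
    rw [if_neg hin]
    refine pvmod_congr hm (h1.trans ?_)
    have : pvP power (pvW cs t (i + 1)) * power + ((cs.getD i ' ').toNat : Int) - 97 + 1
        = pvP power (pvW cs t i) := by
      rw [hw0, pvP_cons, hgi, pvVal]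
      ring
    rw [this]

-- A's loop computes: smallest matching index below the fuel, else the accumulator
theorem pvALoop_spec (cs : List Char) (power modulo k hashValue : Int)
    (hm : modulo ≠ 0) (hk : 0 ≤ k) :
    ∀ (i : Nat) (a : Nat), i ≤ cs.length →
      pvALoop cs power modulo (PySem.Int.mod (power ^ k.toNat) modulo) hashValue k i
        (pvH cs power modulo k.toNat i) a
      = (match (List.range i).find?
            (fun j => pvH cs power modulo k.toNat j == hashValue) with
         | some j => j
         | none => a) := by
  intro i
  induction i with
  | zero => intro a _; simp [pvALoop]
  | succ i ih =>
    intro a hle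
    have hi : i < cs.length := by omega
    simp only [pvALoop]
    have hkk : (k.toNat : Int) = k := Int.toNat_of_nonneg hk
    have hstep := pvRoll cs power modulo hm k.toNat i hi
    rw [hkk] at hstep
    -- identify sc2 with pvH … i
    have hsc2 :
        (if (i : Int) + k < (cs.length : Int) then
            PySem.Int.mod
              (PySem.Int.mod (pvH cs power modulo k.toNat (i + 1) * power + ((cs.getD i ' ').toNat : Int) - 97 + 1) modulo
                - (((cs.getD (i + k.toNat) ' ').toNat : Int) - 97 + 1) * PySem.Int.mod (power ^ k.toNat) modulo) modulo
          else
            PySem.Int.mod (pvH cs power modulo k.toNat (i + 1) * power + ((cs.getD i ' ').toNat : Int) - 97 + 1) modulo)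
          = pvH cs power modulo k.toNat i := hstep
    rw [hsc2]
    rw [ih _ hi.le]
    rw [List.range_succ, List.find?_append]
    cases hfind : (List.range i).find? (fun j => pvH cs power modulo k.toNat j == hashValue) with
    | some j => simp
    | none =>
      simp only [Option.none_or]
      by_cases hmatch : pvH cs power modulo k.toNat i = hashValue
      · simp [hmatch]
      · simp [hmatch, beq_iff_eq]

-- slice with nonneg k is drop/take
theorem pvSlice_window (cs : List Char) (k : Int) (hk : 0 ≤ k) (j : Nat) :
    PySem.List.slice cs (some (j : Int)) (some ((j : Int) + k)) = pvW cs k.toNat j := by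
  have : (j : Int) + k = (j : Int) + (k.toNat : Int) := by
    rw [Int.toNat_of_nonneg hk]
  rw [this, PySem.List.slice_natCast_add]
  rfl

-- ===== VERDICT (by name: the statement is the Claim_ definition above) =====
theorem solution_1482_2_spec : Claim_equal_solution_1482_2 := by
  intro s power modulo k hashValue _hdom hpre
  obtain ⟨hm, hk⟩ := hpre
  unfold Spec_solution_1482_2 solution_1482_2 solution_1482_2_alt
  simp only []
  set cs := s.toList with hcs
  -- the two find? predicates agree
  have hpred : (fun i : Nat => pvBHash power modulo
        (PySem.List.slice cs (some (i : Int)) (some ((i : Int) + k))) == hashValue)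
      = (fun j : Nat => pvH cs power modulo k.toNat j == hashValue) := by
    funext j
    rw [pvSlice_window cs k hk j, pvBHash_eq power modulo hm]
    rfl
  -- initial state: sc = 0 = reduced hash of the empty window past the end
  have hinit : (0 : Int) = pvH cs power modulo k.toNat cs.length := by
    simp [pvH, pvW, pvP, pvmod_zero]
  rw [hinit, pvALoop_spec cs power modulo k hashValue hm hk cs.length 0 le_rfl, hpred]
  cases hfind : (List.range cs.length).find? (fun j => pvH cs power modulo k.toNat j == hashValue) with
  | some j => rfl
  | none =>
    show PySem.Str.slice s (some ((0 : Nat) : Int)) (some (((0 : Nat) : Int) + k))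
        = PySem.Str.slice s none (some k)
    simp [PySem.Str.slice]
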